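-- pv_equiv track=rewrite | github.com/nju-websoft/ReadPyE | library_discovery/candidate_discover.py | _get_leaves
-- ===== SOURCE A (Python) =====
-- def _get_leaves(node_set):
--     # Get leaf nodes of the parse tree
--     sorted_node = sorted(node_set, key=lambda x:len(x.split('.')))
--     length = len(sorted_node)
--
--     del_index = []
--     for i in range(length):
--         for j in range(i+1, length):
--             if sorted_node[j].startswith(sorted_node[i]+'.'):
--                 del_index.append(i)
--                 break
--
--     for index in reversed(del_index):
--         sorted_node.pop(index)
--
--     return sorted_node
-- ===== SOURCE B (Python) =====
-- def _get_leaves(node_set):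
--     # Collect every proper dot-prefix ("ancestor name") of every node once,
--     # then keep the nodes that are not an ancestor of anything, ordered by depth.
--     ancestors = set()
--     for name in node_set:
--         for i, ch in enumerate(name):
--             if ch == '.':
--                 ancestors.add(name[:i])
--     return [x for x in sorted(node_set, key=lambda s: len(s.split('.'))) if x not in ancestors]
-- ===== Notes on version B (the rewrite author's own statement) =====
-- stated objective: faster
-- what changed: Instead of scanning, for each node, all later nodes for a dotted descendant (quadratic in the number of nodes), B makes one pass collecting every proper dot-prefix of every name into a set and then keeps the sorted nodes not in that set.
import Mathlib
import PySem

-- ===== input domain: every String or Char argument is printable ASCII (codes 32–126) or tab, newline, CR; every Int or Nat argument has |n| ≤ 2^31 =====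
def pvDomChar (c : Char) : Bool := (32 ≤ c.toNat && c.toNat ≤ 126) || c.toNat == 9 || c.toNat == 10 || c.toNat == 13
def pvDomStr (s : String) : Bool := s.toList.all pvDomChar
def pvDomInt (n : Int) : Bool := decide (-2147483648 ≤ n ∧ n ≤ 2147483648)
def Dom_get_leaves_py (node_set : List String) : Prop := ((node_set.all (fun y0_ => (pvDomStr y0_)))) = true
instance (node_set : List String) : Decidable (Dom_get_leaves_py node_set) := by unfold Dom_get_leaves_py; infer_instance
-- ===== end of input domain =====

-- B replaces A's quadratic scan for later descendants by one pass collecting every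
-- proper dot-prefix of every name into a set, then filtering the sorted list by membership.

-- ===== PORT A =====
-- the sort key len(x.split('.')), shared by both Pythons' identical lambdas
def pvKey (x : String) : Int := ((PySem.Chars.splitOn x.toList ['.']).length : Int)

-- A's inner 'for j in range(i+1, length): if …: append; break' loop, as the Bool "did it break"
def pvInnerAny (sorted_node : List String) (i : Int) : List Int → Bool
  | [] => false
  | j :: rest =>
      if PySem.Chars.startswith (PySem.List.pyGetD sorted_node j "").toList
          ((PySem.List.pyGetD sorted_node i "").toList ++ ['.']) then true
      else pvInnerAny sorted_node i rest

def get_leaves_py (node_set : List String) : List String :=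
  let sorted_node := PySem.List.sorted node_set pvKey
  let length : Int := sorted_node.length
  let del_index : List Int :=
    (PySem.List.pyRange 0 length 1).foldl (fun acc i =>
      if pvInnerAny sorted_node i (PySem.List.pyRange (i + 1) length 1) then acc ++ [i] else acc) []
  -- 'for index in reversed(del_index): sorted_node.pop(index)' (pop? is always some here)
  del_index.reverse.foldl (fun l index =>
    match PySem.List.pop? l index with
    | some r => r.2
    | none => l) sorted_node

-- ===== PORT B =====
def get_leaves_py_alt (node_set : List String) : List String :=
  let ancestors : PySem.Set String :=
    node_set.foldl (fun acc name =>
      (PySem.List.enumerate name.toList).foldl (fun acc2 ic =>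
        if ic.2 = '.' then PySem.Set.add acc2 (PySem.Str.slice name none (some ic.1)) else acc2) acc)
      (PySem.Set.ofList [])
  (PySem.List.sorted node_set pvKey).filter (fun x => !(decide (x ∈ ancestors)))

-- ===== PRECONDITION & SPEC =====
def Spec_get_leaves_py (node_set : List String) (out : List String) : Prop := out = get_leaves_py_alt node_set
instance (node_set : List String) (out : List String) : Decidable (Spec_get_leaves_py node_set out) := by unfold Spec_get_leaves_py; infer_instance

-- ===== CLAIM (what is proved, stated in full; the proofs are below) =====
def Claim_equal_get_leaves_py : Prop := ∀ (node_set : List String), Dom_get_leaves_py node_set → Spec_get_leaves_py node_set (get_leaves_py node_set)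

-- ===== LEMMAS AND PROOFS =====

def pvDesc (x y : String) : Bool := PySem.Chars.startswith y.toList (x.toList ++ ['.'])
def pvAt (s : List String) (k : Nat) : Bool := (s.drop (k + 1)).any (pvDesc (s.getD k ""))
lemma pvInnerAny_eq_any (s : List String) (i : Int) (js : List Int) :
    pvInnerAny s i js = js.any (fun j =>
      PySem.Chars.startswith (PySem.List.pyGetD s j "").toList
        ((PySem.List.pyGetD s i "").toList ++ ['.'])) := by
  induction js with
  | nil => rfl
  | cons j rest ih =>
    simp only [pvInnerAny, List.any_cons, ih]
    split_ifs with h <;> simp [h]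

lemma pvInnerAny_range (s : List String) (k : Nat) :
    pvInnerAny s (k : Int) (PySem.List.pyRange ((k : Int) + 1) (s.length : Int) 1) = pvAt s k := by
  rw [pvInnerAny_eq_any]
  have hm := PySem.List.map_pyGetD_pyRange' s "" (a := (k : Int) + 1) (by positivity)
  have : (PySem.List.pyRange ((k : Int) + 1) (s.length : Int) 1).any (fun j =>
      PySem.Chars.startswith (PySem.List.pyGetD s j "").toList
        ((PySem.List.pyGetD s (k : Int) "").toList ++ ['.']))
      = ((PySem.List.pyRange ((k : Int) + 1) (s.length : Int) 1).map (fun j => PySem.List.pyGetD s j "")).any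
        (fun y => PySem.Chars.startswith y.toList ((PySem.List.pyGetD s (k : Int) "").toList ++ ['.'])) := by
    rw [List.any_map]; rfl
  rw [this, hm]
  have h2 : (((k : Int) + 1)).toNat = k + 1 := by omega
  rw [h2, PySem.List.pyGetD_natCast]
  rfl

lemma pvDel_eq (s : List String) :
    (PySem.List.pyRange 0 (s.length : Int) 1).foldl (fun acc i =>
      if pvInnerAny s i (PySem.List.pyRange (i + 1) (s.length : Int) 1) then acc ++ [i] else acc) []
    = ((List.range s.length).filter (pvAt s)).map Int.ofNat := by
  rw [PySem.List.foldl_append_if (f := fun (i : Int) => i)]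
  rw [List.nil_append, PySem.List.pyRange_zero_natCast, List.filter_map, List.map_map]
  have : ∀ k ∈ List.range s.length,
      ((fun i => pvInnerAny s i (PySem.List.pyRange (i + 1) (s.length : Int) 1)) ∘ (fun k : Nat => (k : Int))) k
      = pvAt s k := by
    intro k _; exact pvInnerAny_range s k
  rw [List.filter_congr this]
  induction (List.filter (pvAt s) (List.range s.length)) with
  | nil => rfl
  | cons a l ih => simp

def pvPops (s : List String) (idxs : List Int) : List String :=
  idxs.foldl (fun l index =>
    match PySem.List.pop? l index with
    | some r => r.2
    | none => l) s

def pvLeaves : List String → List String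
  | [] => []
  | x :: s => if s.any (pvDesc x) then pvLeaves s else x :: pvLeaves s

lemma pvPop_cons (x : String) (t : List String) (j : Int) (hj : 0 ≤ j) :
    PySem.List.pop? (x :: t) (j + 1) = (PySem.List.pop? t j).map (fun r => (r.1, x :: r.2)) := by
  simp only [PySem.List.pop?, PySem.List.pyIdx?]
  by_cases h : j < (t.length : Int)
  · have hk : j.toNat < t.length := by omega
    have : (j + 1).toNat = j.toNat + 1 := by omega
    simp [hj, h, this, hk, List.getElem?_cons, List.eraseIdx_cons_succ, show 0 ≤ j + 1 by omega]
  · simp [hj, h, show 0 ≤ j + 1 by omega]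

lemma pvPops_shift (x : String) (t : List String) (js : List Int) (h : ∀ j ∈ js, 0 ≤ j) :
    pvPops (x :: t) (js.map (· + 1)) = x :: pvPops t js := by
  induction js generalizing t with
  | nil => rfl
  | cons j rest ih =>
    simp only [List.map_cons, pvPops, List.foldl_cons]
    rw [pvPop_cons x t j (h j (by simp))]
    have hrest : ∀ j ∈ rest, 0 ≤ j := fun j hj => h j (by simp [hj])
    cases hp : PySem.List.pop? t j with
    | none => exact ih t hrest
    | some r => exact ih r.2 hrest

lemma pvAt_cons_zero (x : String) (t : List String) : pvAt (x :: t) 0 = t.any (pvDesc x) := by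
  simp [pvAt]

lemma pvAt_cons_succ (x : String) (t : List String) (k : Nat) : pvAt (x :: t) (k + 1) = pvAt t k := by
  simp [pvAt]

lemma pvPops_append (s : List String) (a b : List Int) :
    pvPops s (a ++ b) = pvPops (pvPops s a) b := by
  simp [pvPops, List.foldl_append]

lemma pvPipe (s : List String) :
    pvPops s (((List.range s.length).filter (pvAt s)).map Int.ofNat).reverse = pvLeaves s := by
  induction s with
  | nil => rfl
  | cons x t ih =>
    have hr : List.range (x :: t).length = 0 :: (List.range t.length).map Nat.succ := by
      simpa using (List.range_succ_eq_map (n := t.length))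
    rw [hr]
    have hf : List.filter (pvAt (x :: t)) (0 :: (List.range t.length).map Nat.succ)
        = (if t.any (pvDesc x) then [0] else []) ++
          ((List.filter (pvAt t) (List.range t.length)).map Nat.succ) := by
      rw [List.filter_cons]
      rw [List.filter_map]
      have : (pvAt (x :: t)) ∘ Nat.succ = pvAt t := by
        funext k; exact pvAt_cons_succ x t k
      rw [this, pvAt_cons_zero]
      split_ifs <;> simp
    rw [hf]
    rw [List.map_append, List.reverse_append, pvPops_append]
    have hmap : ((List.filter (pvAt t) (List.range t.length)).map Nat.succ).map Int.ofNat
        = (((List.filter (pvAt t) (List.range t.length)).map Int.ofNat).map (· + 1)) := by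
      simp [List.map_map]
    rw [hmap]
    have hpos : ∀ j ∈ ((List.filter (pvAt t) (List.range t.length)).map Int.ofNat).reverse, 0 ≤ j := by
      intro j hj; simp at hj; obtain ⟨k, _, rfl⟩ := hj; positivity
    rw [← List.map_reverse, pvPops_shift x t _ hpos, ih]
    by_cases hb : t.any (pvDesc x)
    · simp [hb, pvPops, pvLeaves, PySem.List.pop?_zero_cons]
    · simp [hb, pvPops, pvLeaves]


lemma pvGo_length (fuel : Nat) (l cur : List Char) (acc : List (List Char)) (hf : l.length ≤ fuel) :
    (PySem.Chars.splitOn.go ['.'] fuel l cur acc).length = acc.length + 1 + l.count '.' := by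
  induction fuel generalizing l cur acc with
  | zero =>
    have : l = [] := by simpa using hf
    subst this
    simp [PySem.Chars.splitOn.go]
  | succ n ih =>
    cases l with
    | nil => simp [PySem.Chars.splitOn.go]
    | cons c rest =>
      rw [PySem.Chars.splitOn.go]
      by_cases h : c = '.'
      · have hp : List.isPrefixOf ['.'] (c :: rest) = true := by simp [List.isPrefixOf, h]
        simp only [hp, if_true]
        rw [ih _ _ _ (by simpa using Nat.le_of_succ_le_succ (by simpa using hf))]
        simp [h]
        omega
      · have hp : List.isPrefixOf ['.'] (c :: rest) = false := by
          simp [List.isPrefixOf]; exact fun hc => absurd hc.symm h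
        simp only [hp, Bool.false_eq_true, if_false]
        rw [ih _ _ _ (by simpa using hf)]
        simp [h]

lemma pvSplit_len (cs : List Char) :
    (PySem.Chars.splitOn cs ['.']).length = cs.count '.' + 1 := by
  rw [PySem.Chars.splitOn, pvGo_length _ _ _ _ (by omega)]
  simp
  omega

lemma pvKey_lt_of_desc (x y : String) (h : pvDesc x y = true) : pvKey x < pvKey y := by
  rw [pvDesc, PySem.Chars.startswith_iff] at h
  obtain ⟨r, hr⟩ := h
  simp only [pvKey, pvSplit_len]
  rw [← hr]
  simp [List.count_append]

lemma pvLeaves_filter (ns : List String) : ∀ (s : List String),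
    s.Pairwise (fun a b => pvKey a ≤ pvKey b) →
    (∀ y ∈ s, y ∈ ns) →
    (∀ y ∈ ns, y ∉ s → ∀ z ∈ s, pvKey y ≤ pvKey z) →
    pvLeaves s = s.filter (fun x => !(ns.any (pvDesc x))) := by
  intro s
  induction s with
  | nil => intro _ _ _; rfl
  | cons x t ih =>
    intro hp hsub hinv
    have hpt := (List.pairwise_cons.mp hp).2
    have hhead := (List.pairwise_cons.mp hp).1
    have hsubt : ∀ y ∈ t, y ∈ ns := fun y hy => hsub y (by simp [hy])
    have hinvt : ∀ y ∈ ns, y ∉ t → ∀ z ∈ t, pvKey y ≤ pvKey z := by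
      intro y hy hyt z hz
      by_cases hyx : y ∈ x :: t
      · have : y = x := by rcases hyx with _ | h; rfl; exact absurd (by assumption) hyt
        subst this
        exact hhead z hz
      · exact hinv y hy hyx z (by simp [hz])
    have hcond : t.any (pvDesc x) = ns.any (pvDesc x) := by
      by_cases hg : ns.any (pvDesc x) = true
      · obtain ⟨y, hy, hd⟩ := List.any_eq_true.mp hg
        have hklt := pvKey_lt_of_desc x y hd
        have hyt : y ∈ x :: t := by
          by_contra hyn
          have := hinv y hy hyn x (by simp)
          omega
        have hyt' : y ∈ t := by
          rcases List.mem_cons.mp hyt with hyx | h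
          · subst hyx; exact absurd hklt (lt_irrefl _)
          · exact h
        rw [hg, List.any_eq_true.mpr ⟨y, hyt', hd⟩]
      · have hgf : ns.any (pvDesc x) = false := by simpa using hg
        have hlf : t.any (pvDesc x) = false := by
          cases hl : t.any (pvDesc x) with
          | false => rfl
          | true =>
            obtain ⟨y, hy, hd⟩ := List.any_eq_true.mp hl
            exact absurd (List.any_eq_true.mpr ⟨y, hsubt y hy, hd⟩) hg
        rw [hgf, hlf]
    have hl1 : pvLeaves (x :: t) = if ns.any (pvDesc x) then pvLeaves t else x :: pvLeaves t := by
      rw [pvLeaves, hcond]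
    rw [hl1, List.filter_cons, ih hpt hsubt hinvt]
    cases hb : ns.any (pvDesc x) <;> simp

lemma pvMem_foldIf {α β : Type} [BEq β] [LawfulBEq β] (l : List α) (p : α → Prop) [DecidablePred p]
    (f : α → β) (s0 : PySem.Set β) (y : β) :
    (y ∈ l.foldl (fun s b => if p b then PySem.Set.add s (f b) else s) s0) ↔
      y ∈ s0 ∨ ∃ b ∈ l, p b ∧ y = f b := by
  induction l generalizing s0 with
  | nil => simp
  | cons b rest ih =>
    simp only [List.foldl_cons]
    by_cases hb : p b
    · rw [if_pos hb, ih, PySem.Set.mem_add]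
      constructor
      · rintro (⟨h | h⟩ | ⟨c, hc, hpc, rfl⟩)
        · exact Or.inl h
        · exact Or.inr ⟨b, by simp, hb, h⟩
        · exact Or.inr ⟨c, by simp [hc], hpc, rfl⟩
      · rintro (h | ⟨c, hc, hpc, rfl⟩)
        · exact Or.inl (Or.inl h)
        · rcases List.mem_cons.mp hc with rfl | hc'
          · exact Or.inl (Or.inr rfl)
          · exact Or.inr ⟨c, hc', hpc, rfl⟩
    · rw [if_neg hb, ih]
      constructor
      · rintro (h | ⟨c, hc, hpc, rfl⟩)
        · exact Or.inl h
        · exact Or.inr ⟨c, by simp [hc], hpc, rfl⟩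
      · rintro (h | ⟨c, hc, hpc, rfl⟩)
        · exact Or.inl h
        · rcases List.mem_cons.mp hc with rfl | hc'
          · exact absurd hpc hb
          · exact Or.inr ⟨c, hc', hpc, rfl⟩

lemma pvDesc_iff (x y : String) :
    pvDesc x y = true ↔ ∃ (k : Nat), k < y.toList.length ∧ y.toList[k]? = some '.' ∧ x.toList = y.toList.take k := by
  rw [pvDesc, PySem.Chars.startswith_iff]
  constructor
  · rintro ⟨r, hr⟩
    rw [List.append_assoc] at hr
    refine ⟨x.toList.length, ?_, ?_, ?_⟩
    · rw [← hr]; simp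
    · rw [← hr, List.getElem?_append_right (by simp)]
      simp
    · rw [← hr, List.take_left']
      rfl
  · rintro ⟨k, hk, hdot, htake⟩
    refine ⟨y.toList.drop (k + 1), ?_⟩
    rw [List.append_assoc, htake]
    have h2 : y.toList[k]'hk = '.' := by
      have := List.getElem?_eq_getElem hk
      rw [this] at hdot
      exact (Option.some_inj.mp hdot)
    have := List.drop_eq_getElem_cons hk
    rw [h2] at this
    rw [List.singleton_append, ← this, List.take_append_drop]

lemma pvMem_anc (ns : List String) (x : String) :
    (x ∈ ns.foldl (fun acc name =>
      (PySem.List.enumerate name.toList).foldl (fun acc2 ic =>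
        if ic.2 = '.' then PySem.Set.add acc2 (PySem.Str.slice name none (some ic.1)) else acc2) acc)
      (PySem.Set.ofList [])) ↔ ∃ y ∈ ns, pvDesc x y = true := by
  have inner : ∀ (name : String) (acc : PySem.Set String),
      (x ∈ (PySem.List.enumerate name.toList).foldl (fun acc2 ic =>
        if ic.2 = '.' then PySem.Set.add acc2 (PySem.Str.slice name none (some ic.1)) else acc2) acc)
      ↔ x ∈ acc ∨ pvDesc x name = true := by
    intro name acc
    rw [pvMem_foldIf]
    apply or_congr Iff.rfl
    rw [pvDesc_iff]
    constructor
    · rintro ⟨ic, hic, hdot, rfl⟩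
      obtain ⟨k, hk, rfl⟩ := (PySem.List.mem_enumerate_iff _ _ _).mp hic
      refine ⟨k, hk, ?_, ?_⟩
      · simp only at hdot
        simp [List.getElem?_eq_getElem hk, hdot]
      · simp [PySem.Str.slice, PySem.Chars.slice_eq_listSlice]
    · rintro ⟨k, hk, hdot, htake⟩
      refine ⟨((0 : Int) + (k : Nat), name.toList[k]'hk), ?_, ?_, ?_⟩
      · rw [PySem.List.mem_enumerate_iff]
        exact ⟨k, hk, rfl⟩
      · simp only
        have := List.getElem?_eq_getElem hk
        rw [this] at hdot
        exact (Option.some_inj.mp hdot)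
      · simp [PySem.Str.slice, PySem.Chars.slice_eq_listSlice]
        rw [← String.ofList_toList (s := x), htake]
  have outer : ∀ (l : List String) (acc : PySem.Set String),
      (x ∈ l.foldl (fun acc name =>
        (PySem.List.enumerate name.toList).foldl (fun acc2 ic =>
          if ic.2 = '.' then PySem.Set.add acc2 (PySem.Str.slice name none (some ic.1)) else acc2) acc) acc)
      ↔ x ∈ acc ∨ ∃ y ∈ l, pvDesc x y = true := by
    intro l
    induction l with
    | nil => simp
    | cons n rest ih =>
      intro acc
      rw [List.foldl_cons, ih, inner]
      simp only [List.mem_cons, exists_eq_or_imp]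
      tauto
  rw [outer]
  simp [PySem.Set.ofList]


-- ===== VERDICT (by name: the statement is the Claim_ definition above) =====
theorem get_leaves_py_spec : Claim_equal_get_leaves_py := by
  intro ns _
  show get_leaves_py ns = get_leaves_py_alt ns
  have hA : get_leaves_py ns =
      pvPops (PySem.List.sorted ns pvKey)
        ((PySem.List.pyRange 0 ((PySem.List.sorted ns pvKey).length : Int) 1).foldl
          (fun acc i => if pvInnerAny (PySem.List.sorted ns pvKey) i
              (PySem.List.pyRange (i + 1) ((PySem.List.sorted ns pvKey).length : Int) 1) then acc ++ [i] else acc)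
          []).reverse := rfl
  rw [hA, pvDel_eq, pvPipe]
  have hB : get_leaves_py_alt ns =
      (PySem.List.sorted ns pvKey).filter (fun x => !(decide (x ∈ ns.foldl (fun acc name =>
        (PySem.List.enumerate name.toList).foldl (fun acc2 ic =>
          if ic.2 = '.' then PySem.Set.add acc2 (PySem.Str.slice name none (some ic.1)) else acc2) acc)
        (PySem.Set.ofList [])))) := rfl
  rw [hB]
  rw [pvLeaves_filter ns (PySem.List.sorted ns pvKey) (PySem.List.sorted_pairwise ns pvKey)
      (fun y hy => (PySem.List.mem_sorted ns pvKey false y).mp hy)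
      (fun y hy hyn => absurd ((PySem.List.mem_sorted ns pvKey false y).mpr hy) hyn)]
  apply List.filter_congr
  intro x _
  have hiff := pvMem_anc ns x
  have hd : decide (x ∈ ns.foldl (fun acc name =>
        (PySem.List.enumerate name.toList).foldl (fun acc2 ic =>
          if ic.2 = '.' then PySem.Set.add acc2 (PySem.Str.slice name none (some ic.1)) else acc2) acc)
        (PySem.Set.ofList [])) = ns.any (pvDesc x) := by
    by_cases h : x ∈ ns.foldl (fun acc name =>
        (PySem.List.enumerate name.toList).foldl (fun acc2 ic =>
          if ic.2 = '.' then PySem.Set.add acc2 (PySem.Str.slice name none (some ic.1)) else acc2) acc)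
        (PySem.Set.ofList [])
    · have h2 : ns.any (pvDesc x) = true := List.any_eq_true.mpr (hiff.mp h)
      rw [h2]
      exact decide_eq_true h
    · have hno : ¬ ∃ y ∈ ns, pvDesc x y = true := fun hc => h (hiff.mpr hc)
      have h2 : ns.any (pvDesc x) = false := by
        rw [← Bool.not_eq_true, List.any_eq_true]
        exact hno
      rw [h2]
      exact decide_eq_false h
  rw [hd]
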